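-- pv_equiv track=rewrite | github.com/linusmaastok/Tareas_Algoritmos_2021 | Tarea2-2021.py | esDigitPrimo
-- ===== SOURCE A (Python) =====
-- def largo(num):
--     largo = 0
--     while num >= 1 :
--         largo += 1
--         num = num // 10
--     return(largo)
--
-- def primo(num):
--     if num == 0 or num == 1: return False
--     for n in range(2, num):
--         if num % n == 0:
--             return False
--     return True
--
-- def esDigitPrimo(n):
--     l = largo(n)
--     contador = 0
--     for i in range(0,l):
--         if primo(n%10) : contador = contador + 1
--         n = n // 10
--     if contador > 1 : return True
--     else: return False
-- ===== SOURCE B (Python) =====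
-- def esDigitPrimo(n):
--     count = 0
--     while n >= 1:
--         if n % 10 in (2, 3, 5, 7):
--             count += 1
--             if count > 1:
--                 return True
--         n = n // 10
--     return False
-- ===== Notes on version B (the rewrite author's own statement) =====
-- stated objective: simpler
-- what changed: Single pass with early exit: drops A's separate largo length-counting pass and the primo trial-division helper, testing each digit against a fixed set of the one-digit primes and returning True as soon as a second prime digit is seen.
import Mathlib
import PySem

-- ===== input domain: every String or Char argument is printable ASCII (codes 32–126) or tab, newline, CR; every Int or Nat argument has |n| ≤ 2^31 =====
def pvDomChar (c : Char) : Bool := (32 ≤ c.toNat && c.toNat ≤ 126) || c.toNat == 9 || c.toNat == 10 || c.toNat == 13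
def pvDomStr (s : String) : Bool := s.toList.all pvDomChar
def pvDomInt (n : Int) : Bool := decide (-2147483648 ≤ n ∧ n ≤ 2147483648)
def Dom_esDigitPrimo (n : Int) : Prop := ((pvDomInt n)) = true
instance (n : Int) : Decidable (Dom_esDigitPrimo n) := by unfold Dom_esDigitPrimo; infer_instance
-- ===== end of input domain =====

-- B is a single digit pass with early exit (no separate length pass, no trial division); objective: simpler.

theorem pv_div10_lt (n : Int) (h : 1 ≤ n) : (PySem.Int.floordiv n 10).toNat < n.toNat := by
  rw [PySem.Int.floordiv_eq_ediv_of_pos (by norm_num)]; omega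

-- ===== PORT A =====
def largo (num : Int) : Int :=
  if h : num ≥ 1 then 1 + largo (PySem.Int.floordiv num 10) else 0
termination_by num.toNat
decreasing_by exact pv_div10_lt num h

def primo (num : Int) : Bool :=
  if num = 0 ∨ num = 1 then false
  else (PySem.List.pyRange 2 num 1).all (fun k => !(PySem.Int.mod num k == 0))

def esDigitPrimo (n : Int) : Bool :=
  let l := largo n
  let st := (PySem.List.pyRange 0 l 1).foldl
    (fun (s : Int × Int) _ =>
      (PySem.Int.floordiv s.1 10, if primo (PySem.Int.mod s.1 10) then s.2 + 1 else s.2))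
    (n, 0)
  if st.2 > 1 then true else false

-- ===== PORT B =====
def esDigitPrimoAltGo (n : Int) (count : Int) : Bool :=
  if h : n ≥ 1 then
    let d := PySem.Int.mod n 10
    if d = 2 ∨ d = 3 ∨ d = 5 ∨ d = 7 then
      if count + 1 > 1 then true
      else esDigitPrimoAltGo (PySem.Int.floordiv n 10) (count + 1)
    else esDigitPrimoAltGo (PySem.Int.floordiv n 10) count
  else false
termination_by n.toNat
decreasing_by all_goals exact pv_div10_lt n h

def esDigitPrimo_alt (n : Int) : Bool := esDigitPrimoAltGo n 0

-- ===== PRECONDITION & SPEC =====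
def Spec_esDigitPrimo (n : Int) (out : Bool) : Prop := out = esDigitPrimo_alt n
instance (n : Int) (out : Bool) : Decidable (Spec_esDigitPrimo n out) := by unfold Spec_esDigitPrimo; infer_instance

-- ===== CLAIM (what is proved, stated in full; the proofs are below) =====
def Claim_equal_esDigitPrimo : Prop := ∀ (n : Int), Dom_esDigitPrimo n → Spec_esDigitPrimo n (esDigitPrimo n)

-- ===== LEMMAS AND PROOFS =====

-- prime-digit count of n (digits taken while n ≥ 1, like both loops)
def pvP (n : Int) : Int :=
  if h : n ≥ 1 then
    (if PySem.Int.mod n 10 = 2 ∨ PySem.Int.mod n 10 = 3 ∨ PySem.Int.mod n 10 = 5 ∨ PySem.Int.mod n 10 = 7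
     then 1 else 0) + pvP (PySem.Int.floordiv n 10)
  else 0
termination_by n.toNat
decreasing_by exact pv_div10_lt n h

theorem pvP_nonneg (n : Int) : 0 ≤ pvP n := by
  fun_induction pvP n with
  | case1 n h ih => split <;> omega
  | case2 n h => omega

theorem pv_largo_nonneg (n : Int) : 0 ≤ largo n := by
  fun_induction largo n with
  | case1 n h ih => omega
  | case2 n h => omega

theorem pv_mod10_bounds (n : Int) : 0 ≤ PySem.Int.mod n 10 ∧ PySem.Int.mod n 10 < 10 := by
  rw [PySem.Int.mod_eq_emod_of_pos (by norm_num)]; omega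

theorem pv_primo_digit (d : Int) (h0 : 0 ≤ d) (h9 : d < 10) :
    primo d = decide (d = 2 ∨ d = 3 ∨ d = 5 ∨ d = 7) := by
  interval_cases d <;> decide

theorem pv_largo_zero (n : Int) (h : ¬ n ≥ 1) : largo n = 0 := by
  rw [largo]; simp [h]

theorem pv_loopA (xs : List Int) : ∀ (n c : Int), (largo n).toNat = xs.length →
    ((xs.foldl
      (fun (s : Int × Int) _ =>
        (PySem.Int.floordiv s.1 10, if primo (PySem.Int.mod s.1 10) then s.2 + 1 else s.2))
      (n, c)).2 : Int) = c + pvP n := by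
  induction xs with
  | nil =>
    intro n c hlen
    simp only [List.length_nil] at hlen
    by_cases h : n ≥ 1
    · exfalso
      rw [largo, dif_pos h] at hlen
      have h2 := pv_largo_nonneg (PySem.Int.floordiv n 10)
      omega
    · simp only [List.foldl_nil]
      rw [pvP, dif_neg h]
      omega
  | cons x t ih =>
    intro n c hlen
    simp only [List.length_cons] at hlen
    by_cases h : n ≥ 1
    · have hl : largo n = 1 + largo (PySem.Int.floordiv n 10) := by
        rw [largo, dif_pos h]
      have h2 := pv_largo_nonneg (PySem.Int.floordiv n 10)
      have hlen' : (largo (PySem.Int.floordiv n 10)).toNat = t.length := by omega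
      have hmod := pv_mod10_bounds n
      have hd := pv_primo_digit (PySem.Int.mod n 10) hmod.1 hmod.2
      have hP : pvP n = (if PySem.Int.mod n 10 = 2 ∨ PySem.Int.mod n 10 = 3 ∨ PySem.Int.mod n 10 = 5 ∨ PySem.Int.mod n 10 = 7
          then 1 else 0) + pvP (PySem.Int.floordiv n 10) := by rw [pvP, dif_pos h]
      simp only [List.foldl_cons]
      rw [ih _ _ hlen', hd, hP]
      by_cases hp : PySem.Int.mod n 10 = 2 ∨ PySem.Int.mod n 10 = 3 ∨ PySem.Int.mod n 10 = 5 ∨ PySem.Int.mod n 10 = 7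
      · simp only [hp, decide_true, if_true]
        omega
      · simp only [hp, decide_false, Bool.false_eq_true, if_false]
        omega
    · exfalso
      rw [pv_largo_zero n h] at hlen
      omega

theorem pv_loopB (k : Nat) : ∀ (n c : Int), n.toNat ≤ k → 0 ≤ c → c ≤ 1 →
    esDigitPrimoAltGo n c = decide (c + pvP n > 1) := by
  induction k with
  | zero =>
    intro n c hk h0 h1
    have h : ¬ n ≥ 1 := by omega
    rw [esDigitPrimoAltGo, dif_neg h, pvP, dif_neg h, eq_comm, decide_eq_false_iff_not]
    omega
  | succ k ih =>
    intro n c hk h0 h1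
    by_cases h : n ≥ 1
    · have hlt := pv_div10_lt n h
      have hk' : (PySem.Int.floordiv n 10).toNat ≤ k := by omega
      have hP : pvP n = (if PySem.Int.mod n 10 = 2 ∨ PySem.Int.mod n 10 = 3 ∨ PySem.Int.mod n 10 = 5 ∨ PySem.Int.mod n 10 = 7
          then 1 else 0) + pvP (PySem.Int.floordiv n 10) := by rw [pvP, dif_pos h]
      have hPn := pvP_nonneg (PySem.Int.floordiv n 10)
      rw [esDigitPrimoAltGo, dif_pos h]
      by_cases hp : PySem.Int.mod n 10 = 2 ∨ PySem.Int.mod n 10 = 3 ∨ PySem.Int.mod n 10 = 5 ∨ PySem.Int.mod n 10 = 7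
      · simp only [hp, if_true]
        by_cases hc : c + 1 > 1
        · simp only [hc, if_true]
          rw [hP]
          simp only [hp, if_true]
          rw [eq_comm, decide_eq_true_iff]
          omega
        · simp only [hc, if_false]
          rw [ih _ _ hk' (by omega) (by omega), hP]
          simp only [hp, if_true]
          exact decide_eq_decide.mpr (by omega)
      · simp only [hp, if_false]
        rw [ih _ _ hk' h0 h1, hP]
        simp only [hp, if_false]
        exact decide_eq_decide.mpr (by omega)
    · rw [esDigitPrimoAltGo, dif_neg h, pvP, dif_neg h, eq_comm, decide_eq_false_iff_not]
      omega

-- ===== VERDICT (by name: the statement is the Claim_ definition above) =====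
theorem esDigitPrimo_spec : Claim_equal_esDigitPrimo := by
  intro n _
  unfold Spec_esDigitPrimo esDigitPrimo esDigitPrimo_alt
  have hA := pv_loopA (PySem.List.pyRange 0 (largo n) 1) n 0
    (by rw [PySem.List.length_pyRange_one]; omega)
  simp only [hA, zero_add]
  rw [pv_loopB n.toNat n 0 (le_refl _) (by norm_num) (by norm_num)]
  simp only [zero_add]
  by_cases h : pvP n > 1 <;> simp [h]
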